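-- pv_equiv track=rewrite | github.com/PondSec/marc_agent | server/task_manager.py | _pick_python_preview_entry
-- ===== SOURCE A (Python) =====
-- def _pick_python_preview_entry(display_paths: list[str]) -> str | None:
--     candidates = [
--         path
--         for path in display_paths
--         if path.lower().endswith(".py") and not path.startswith("tests/")
--     ]
--     if not candidates:
--         return None
--     preferred = ("main.py", "app.py", "server.py", "run.py", "manage.py")
--     for candidate in preferred:
--         if candidate in candidates:
--             return candidate
--     root_level = [path for path in candidates if "/" not in path]
--     if root_level:
--         return root_level[0]
--     return candidates[0]
-- ===== SOURCE B (Python) =====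
-- def _pick_python_preview_entry(display_paths: list[str]) -> str | None:
--     preferred = ("main.py", "app.py", "server.py", "run.py", "manage.py")
--     best = None  # (priority, path) with the lowest priority seen, earliest wins ties
--     for path in display_paths:
--         if not (path.lower().endswith(".py") and not path.startswith("tests/")):
--             continue
--         if path in preferred:
--             prio = preferred.index(path)
--         elif "/" not in path:
--             prio = 5
--         else:
--             prio = 6
--         if best is None or prio < best[0]:
--             best = (prio, path)
--     return None if best is None else best[1]
-- ===== Notes on version B (the rewrite author's own statement) =====
-- stated objective: alternative
-- what changed: Replaces A's three sequential selection phases (membership scan per preferred name, root-level comprehension, candidates[0] fallback) with a single stable-argmin pass over display_paths keyed by a per-path priority (preferred index 0-4, root-level 5, nested 6).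
import Mathlib
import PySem

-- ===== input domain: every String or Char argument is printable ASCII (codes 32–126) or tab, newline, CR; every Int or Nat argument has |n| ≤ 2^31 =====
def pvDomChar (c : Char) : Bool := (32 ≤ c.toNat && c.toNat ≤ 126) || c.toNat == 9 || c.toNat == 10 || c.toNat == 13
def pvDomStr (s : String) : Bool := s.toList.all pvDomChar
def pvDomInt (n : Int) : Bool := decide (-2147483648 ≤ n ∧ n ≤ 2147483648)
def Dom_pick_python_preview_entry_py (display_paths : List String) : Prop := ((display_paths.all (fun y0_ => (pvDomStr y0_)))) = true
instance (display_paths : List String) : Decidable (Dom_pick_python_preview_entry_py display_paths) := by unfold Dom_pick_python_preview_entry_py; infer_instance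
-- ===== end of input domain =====

-- B replaces A's three sequential selection phases with one stable-argmin pass keyed by a per-path priority (alternative decomposition, same cost).


-- the comprehension condition shared verbatim by both Pythons:
-- path.lower().endswith(".py") and not path.startswith("tests/")
def pvCand (path : String) : Bool :=
  PySem.Str.endswith (PySem.Str.lower path) ".py" && !(PySem.Str.startswith path "tests/")

def pvPreferred : List String := ["main.py", "app.py", "server.py", "run.py", "manage.py"]

-- ===== PORT A =====
def pick_python_preview_entry_py (display_paths : List String) : Option String :=
  let candidates := display_paths.filter (fun path => pvCand path)
  if candidates.isEmpty then none
  else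
    match pvPreferred.find? (fun candidate => candidates.contains candidate) with
    | some candidate => some candidate
    | none =>
      let root_level := candidates.filter (fun path => !(PySem.Str.isIn "/" path))
      match root_level with
      | r :: _ => some r
      | [] => candidates.head?   -- candidates[0]; candidates nonempty here

-- ===== PORT B =====
-- priority of a candidate path, as in Source B
def pvPrio (path : String) : Int :=
  match PySem.List.index? pvPreferred path with
  | some i => (i : Int)
  | none => if !(PySem.Str.isIn "/" path) then 5 else 6

-- one iteration of Source B's loop (continue on non-candidates, keep lower priority)
def pvStep (b : Option (Int × String)) (path : String) : Option (Int × String) :=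
  if !(pvCand path) then b
  else
    let prio := pvPrio path
    match b with
    | none => some (prio, path)
    | some (q, _) => if prio < q then some (prio, path) else b

def pick_python_preview_entry_py_alt (display_paths : List String) : Option String :=
  match display_paths.foldl pvStep none with
  | none => none
  | some (_, p) => some p

-- ===== PRECONDITION & SPEC =====
def Spec_pick_python_preview_entry_py (display_paths : List String) (out : Option String) : Prop := out = pick_python_preview_entry_py_alt display_paths
instance (display_paths : List String) (out : Option String) : Decidable (Spec_pick_python_preview_entry_py display_paths out) := by unfold Spec_pick_python_preview_entry_py; infer_instance

-- ===== CLAIM (what is proved, stated in full; the proofs are below) =====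
def Claim_equal_pick_python_preview_entry_py : Prop := ∀ (display_paths : List String), Dom_pick_python_preview_entry_py display_paths → Spec_pick_python_preview_entry_py display_paths (pick_python_preview_entry_py display_paths)

-- ===== LEMMAS AND PROOFS =====

-- pvPrio written out as a decision tree over the five preferred names
theorem pvPrio_cases (p : String) : pvPrio p =
    if p = "main.py" then 0 else if p = "app.py" then 1 else if p = "server.py" then 2
    else if p = "run.py" then 3 else if p = "manage.py" then 4
    else if !(PySem.Str.isIn "/" p) then 5 else 6 := by
  unfold pvPrio pvPreferred
  by_cases h1 : p = "main.py"
  · subst h1; rw [PySem.List.index?_cons_self]; norm_num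
  rw [PySem.List.index?_cons_of_ne _ (Ne.symm h1)]
  by_cases h2 : p = "app.py"
  · subst h2; rw [PySem.List.index?_cons_self]; simp [h1]
  rw [PySem.List.index?_cons_of_ne _ (Ne.symm h2)]
  by_cases h3 : p = "server.py"
  · subst h3; rw [PySem.List.index?_cons_self]; simp [h1, h2]
  rw [PySem.List.index?_cons_of_ne _ (Ne.symm h3)]
  by_cases h4 : p = "run.py"
  · subst h4; rw [PySem.List.index?_cons_self]; simp [h1, h2, h3]
  rw [PySem.List.index?_cons_of_ne _ (Ne.symm h4)]
  by_cases h5 : p = "manage.py"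
  · subst h5; rw [PySem.List.index?_cons_self]; simp [h1, h2, h3, h4]
  rw [PySem.List.index?_cons_of_ne _ (Ne.symm h5)]
  have h0 : PySem.List.index? ([] : List String) p = none := rfl
  rw [h0]
  simp [h1, h2, h3, h4, h5]

theorem pvPrio_nonneg (p : String) : 0 ≤ pvPrio p := by
  rw [pvPrio_cases]; split_ifs <;> norm_num

theorem pvPrio_le_six (p : String) : pvPrio p ≤ 6 := by
  rw [pvPrio_cases]; split_ifs <;> norm_num

-- minimum priority of a list (7 when empty)
def pvMinlevel (cs : List String) : Int := cs.foldr (fun p m => min (pvPrio p) m) 7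

theorem pvMinlevel_cons (a : String) (t : List String) :
    pvMinlevel (a :: t) = min (pvPrio a) (pvMinlevel t) := rfl

-- first element at a given priority level
def pvFirstAt (k : Int) (cs : List String) : Option String := cs.find? (fun p => pvPrio p == k)

theorem pvMinlevel_le {cs : List String} {p : String} (h : p ∈ cs) : pvMinlevel cs ≤ pvPrio p := by
  induction cs with
  | nil => cases h
  | cons a t ih =>
    rw [pvMinlevel_cons]
    rcases List.mem_cons.mp h with h | h
    · subst h; exact min_le_left _ _
    · exact le_trans (min_le_right _ _) (ih h)

theorem le_pvMinlevel {cs : List String} {q : Int} (hq : q ≤ 7) (h : ∀ p ∈ cs, q ≤ pvPrio p) :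
    q ≤ pvMinlevel cs := by
  induction cs with
  | nil => exact hq
  | cons a t ih =>
    rw [pvMinlevel_cons]
    exact le_min (h a (List.mem_cons_self)) (ih (fun p hp => h p (List.mem_cons_of_mem _ hp)))

theorem find?_congr_mem {α : Type} {l : List α} {p q : α → Bool} (h : ∀ a ∈ l, p a = q a) :
    l.find? p = l.find? q := by
  induction l with
  | nil => rfl
  | cons a t ih =>
    rw [List.find?_cons, List.find?_cons, h a List.mem_cons_self]
    cases hq : q a
    · exact ih (fun b hb => h b (List.mem_cons_of_mem _ hb))
    · rfl

theorem find?_beq_self {l : List String} {x : String} (h : x ∈ l) :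
    l.find? (fun p => p == x) = some x := by
  induction l with
  | nil => cases h
  | cons a t ih =>
    by_cases ha : a = x
    · subst ha; simp
    · have hxt : x ∈ t := by
        rcases List.mem_cons.mp h with h' | h'
        · exact absurd h'.symm ha
        · exact h'
      rw [List.find?_cons_of_neg (by simp [ha])]
      exact ih hxt

theorem find?_eq_head?_filter {α : Type} (l : List α) (p : α → Bool) :
    l.find? p = (l.filter p).head? := by
  induction l with
  | nil => rfl
  | cons a t ih =>
    cases ha : p a
    · rw [List.find?_cons_of_neg (by simp [ha]), List.filter_cons_of_neg (by simp [ha]), ih]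
    · rw [List.find?_cons_of_pos ha, List.filter_cons_of_pos ha, List.head?_cons]

theorem pvStep_cand_none {a : String} (hca : pvCand a = true) :
    pvStep none a = some (pvPrio a, a) := by
  simp [pvStep, hca]

theorem pvStep_cand_some {a x : String} {q : Int} (hca : pvCand a = true) :
    pvStep (some (q, x)) a = if pvPrio a < q then some (pvPrio a, a) else some (q, x) := by
  simp [pvStep, hca]

-- the fold with an accumulator computes the stable argmin
theorem pvFold_spec (cs : List String) : ∀ (q : Int) (x : String), q ≤ 6 → (∀ p ∈ cs, pvCand p = true) →
    (cs.foldl pvStep (some (q, x))).map Prod.snd =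
      if pvMinlevel cs < q then pvFirstAt (pvMinlevel cs) cs else some x := by
  induction cs with
  | nil =>
    intro q x hq _
    have : ¬ pvMinlevel [] < q := by simp [pvMinlevel]; omega
    simp [this]
  | cons a t ih =>
    intro q x hq hc
    have hca : pvCand a = true := hc a List.mem_cons_self
    have hct : ∀ p ∈ t, pvCand p = true := fun p hp => hc p (List.mem_cons_of_mem _ hp)
    have hb6 : pvPrio a ≤ 6 := pvPrio_le_six a
    rw [List.foldl_cons, pvStep_cand_some hca]
    by_cases hlt : pvPrio a < q
    · rw [if_pos hlt, ih (pvPrio a) a hb6 hct]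
      by_cases h2 : pvMinlevel t < pvPrio a
      · rw [if_pos h2, if_pos (by rw [pvMinlevel_cons]; omega)]
        rw [pvMinlevel_cons, min_eq_right (le_of_lt h2)]
        unfold pvFirstAt
        rw [List.find?_cons_of_neg (by simp; omega)]
      · rw [if_neg h2, if_pos (by rw [pvMinlevel_cons]; omega)]
        rw [pvMinlevel_cons, min_eq_left (by omega)]
        unfold pvFirstAt
        rw [List.find?_cons_of_pos (by simp)]
    · rw [if_neg hlt, ih q x hq hct]
      by_cases h2 : pvMinlevel t < q
      · rw [if_pos h2, if_pos (by rw [pvMinlevel_cons]; omega)]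
        rw [pvMinlevel_cons, min_eq_right (by omega)]
        unfold pvFirstAt
        rw [List.find?_cons_of_neg (by simp; omega)]
      · rw [if_neg h2, if_neg (by rw [pvMinlevel_cons]; omega)]

theorem pvFold_none (cs : List String) (hne : cs ≠ []) (hc : ∀ p ∈ cs, pvCand p = true) :
    (cs.foldl pvStep none).map Prod.snd = pvFirstAt (pvMinlevel cs) cs := by
  cases cs with
  | nil => exact absurd rfl hne
  | cons a t =>
    have hca : pvCand a = true := hc a List.mem_cons_self
    have hct : ∀ p ∈ t, pvCand p = true := fun p hp => hc p (List.mem_cons_of_mem _ hp)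
    rw [List.foldl_cons, pvStep_cand_none hca]
    rw [pvFold_spec t (pvPrio a) a (pvPrio_le_six a) hct]
    by_cases h2 : pvMinlevel t < pvPrio a
    · rw [if_pos h2, pvMinlevel_cons, min_eq_right (le_of_lt h2)]
      unfold pvFirstAt
      rw [List.find?_cons_of_neg (by simp; omega)]
    · rw [if_neg h2, pvMinlevel_cons, min_eq_left (by omega)]
      unfold pvFirstAt
      rw [List.find?_cons_of_pos (by simp)]

theorem foldl_step_filter (l : List String) : ∀ (b : Option (Int × String)),
    l.foldl pvStep b = (l.filter (fun p => pvCand p)).foldl pvStep b := by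
  induction l with
  | nil => intro b; rfl
  | cons a t ih =>
    intro b
    cases hca : pvCand a
    · rw [List.filter_cons_of_neg (by simp [hca]), List.foldl_cons]
      have : pvStep b a = b := by simp [pvStep, hca]
      rw [this, ih]
    · rw [List.filter_cons_of_pos (by simp [hca]), List.foldl_cons, List.foldl_cons, ih]

-- helper: the level-i characterisations used in selA_spec
theorem pvFirstAt_of_name {cs : List String} {x : String} {k : Int}
    (hx : x ∈ cs) (hpx : pvPrio x = k)
    (huni : ∀ p : String, pvPrio p = k → p = x) :
    pvFirstAt k cs = some x := by
  unfold pvFirstAt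
  rw [find?_congr_mem (q := fun p => p == x) (fun a _ => by
    by_cases hak : pvPrio a = k
    · have hax := huni a hak; subst hax; simp [hak]
    · have hax : a ≠ x := fun e => hak (e ▸ hpx)
      simp [hak, hax])]
  exact find?_beq_self hx

theorem pvMinlevel_eq {cs : List String} {x : String} {k : Int}
    (hx : x ∈ cs) (hpx : pvPrio x = k) (hge : ∀ p ∈ cs, k ≤ pvPrio p) (hk : k ≤ 7) :
    pvMinlevel cs = k := by
  have h1 := pvMinlevel_le hx
  have h2 := le_pvMinlevel hk hge
  omega

theorem pvPrio_eq_level {p : String} {k : Int} (h : pvPrio p = k) (hk : 0 ≤ k) (hk4 : k ≤ 4) :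
    p = if k = 0 then "main.py" else if k = 1 then "app.py" else if k = 2 then "server.py"
        else if k = 3 then "run.py" else "manage.py" := by
  have hc := pvPrio_cases p
  rw [h] at hc
  split_ifs at hc <;> split_ifs <;> first | assumption | omega

-- A's phased selection also picks the first element of minimal priority
theorem selA_spec (cs : List String) (hne : cs ≠ []) (hc : ∀ p ∈ cs, pvCand p = true) :
    (match pvPreferred.find? (fun candidate => cs.contains candidate) with
      | some candidate => some candidate
      | none =>
        match cs.filter (fun path => !(PySem.Str.isIn "/" path)) with
        | r :: _ => some r
        | [] => cs.head?) = pvFirstAt (pvMinlevel cs) cs := by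
  by_cases c1 : "main.py" ∈ cs
  · rw [show pvPreferred.find? (fun c => cs.contains c) = some "main.py" by
      unfold pvPreferred
      exact List.find?_cons_of_pos (p := fun c => cs.contains c) (by simpa using c1)]
    rw [pvMinlevel_eq (k := 0) c1 (by decide) (fun p _ => pvPrio_nonneg p) (by norm_num)]
    exact (pvFirstAt_of_name c1 (by decide)
      (fun p h => by simpa using pvPrio_eq_level (k := 0) h (by norm_num) (by norm_num))).symm
  by_cases c2 : "app.py" ∈ cs
  · rw [show pvPreferred.find? (fun c => cs.contains c) = some "app.py" by
      unfold pvPreferred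
      rw [List.find?_cons_of_neg (p := fun c => cs.contains c) (by simpa using c1)]
      exact List.find?_cons_of_pos (p := fun c => cs.contains c) (by simpa using c2)]
    rw [pvMinlevel_eq (k := 1) c2 (by decide) (fun p hp => by
        rw [pvPrio_cases p]
        split_ifs <;> first | omega | (exfalso; subst_vars; simp_all)) (by norm_num)]
    exact (pvFirstAt_of_name c2 (by decide)
      (fun p h => by simpa using pvPrio_eq_level (k := 1) h (by norm_num) (by norm_num))).symm
  by_cases c3 : "server.py" ∈ cs
  · rw [show pvPreferred.find? (fun c => cs.contains c) = some "server.py" by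
      unfold pvPreferred
      rw [List.find?_cons_of_neg (p := fun c => cs.contains c) (by simpa using c1),
        List.find?_cons_of_neg (p := fun c => cs.contains c) (by simpa using c2)]
      exact List.find?_cons_of_pos (p := fun c => cs.contains c) (by simpa using c3)]
    rw [pvMinlevel_eq (k := 2) c3 (by decide) (fun p hp => by
        rw [pvPrio_cases p]
        split_ifs <;> first | omega | (exfalso; subst_vars; simp_all)) (by norm_num)]
    exact (pvFirstAt_of_name c3 (by decide)
      (fun p h => by simpa using pvPrio_eq_level (k := 2) h (by norm_num) (by norm_num))).symm
  by_cases c4 : "run.py" ∈ cs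
  · rw [show pvPreferred.find? (fun c => cs.contains c) = some "run.py" by
      unfold pvPreferred
      rw [List.find?_cons_of_neg (p := fun c => cs.contains c) (by simpa using c1),
        List.find?_cons_of_neg (p := fun c => cs.contains c) (by simpa using c2),
        List.find?_cons_of_neg (p := fun c => cs.contains c) (by simpa using c3)]
      exact List.find?_cons_of_pos (p := fun c => cs.contains c) (by simpa using c4)]
    rw [pvMinlevel_eq (k := 3) c4 (by decide) (fun p hp => by
        rw [pvPrio_cases p]
        split_ifs <;> first | omega | (exfalso; subst_vars; simp_all)) (by norm_num)]
    exact (pvFirstAt_of_name c4 (by decide)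
      (fun p h => by simpa using pvPrio_eq_level (k := 3) h (by norm_num) (by norm_num))).symm
  by_cases c5 : "manage.py" ∈ cs
  · rw [show pvPreferred.find? (fun c => cs.contains c) = some "manage.py" by
      unfold pvPreferred
      rw [List.find?_cons_of_neg (p := fun c => cs.contains c) (by simpa using c1),
        List.find?_cons_of_neg (p := fun c => cs.contains c) (by simpa using c2),
        List.find?_cons_of_neg (p := fun c => cs.contains c) (by simpa using c3),
        List.find?_cons_of_neg (p := fun c => cs.contains c) (by simpa using c4)]
      exact List.find?_cons_of_pos (p := fun c => cs.contains c) (by simpa using c5)]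
    rw [pvMinlevel_eq (k := 4) c5 (by decide) (fun p hp => by
        rw [pvPrio_cases p]
        split_ifs <;> first | omega | (exfalso; subst_vars; simp_all)) (by norm_num)]
    exact (pvFirstAt_of_name c5 (by decide)
      (fun p h => by simpa using pvPrio_eq_level (k := 4) h (by norm_num) (by norm_num))).symm
  -- no preferred name is a candidate: every candidate has priority 5 or 6
  rw [show pvPreferred.find? (fun c => cs.contains c) = none by
    unfold pvPreferred
    rw [List.find?_cons_of_neg (p := fun c => cs.contains c) (by simpa using c1),
      List.find?_cons_of_neg (p := fun c => cs.contains c) (by simpa using c2),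
      List.find?_cons_of_neg (p := fun c => cs.contains c) (by simpa using c3),
      List.find?_cons_of_neg (p := fun c => cs.contains c) (by simpa using c4),
      List.find?_cons_of_neg (p := fun c => cs.contains c) (by simpa using c5)]
    rfl]
  have hp56 : ∀ p ∈ cs, pvPrio p = if !(PySem.Str.isIn "/" p) then 5 else 6 := by
    intro p hp
    rw [pvPrio_cases p]
    split_ifs <;> first | rfl | omega | (exfalso; subst_vars; simp_all)
  cases hrl : cs.filter (fun path => !(PySem.Str.isIn "/" path)) with
  | cons r rt =>
    have hrf : r ∈ cs.filter (fun path => !(PySem.Str.isIn "/" path)) := by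
      rw [hrl]; exact List.mem_cons_self
    have hrmem : r ∈ cs := (List.mem_filter.mp hrf).1
    have hrni : (!(PySem.Str.isIn "/" r)) = true := (List.mem_filter.mp hrf).2
    have hpr : pvPrio r = 5 := by rw [hp56 r hrmem, if_pos hrni]
    rw [pvMinlevel_eq hrmem hpr (fun p hp => by rw [hp56 p hp]; split_ifs <;> omega) (by norm_num)]
    have hfa : pvFirstAt 5 cs = cs.find? (fun p => !(PySem.Str.isIn "/" p)) := by
      unfold pvFirstAt
      exact find?_congr_mem (fun p hp => by
        rw [hp56 p hp]
        cases h : (!(PySem.Str.isIn "/" p)) <;> simp)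
    rw [hfa, find?_eq_head?_filter, hrl]
    rfl
  | nil =>
    have hall : ∀ p ∈ cs, pvPrio p = 6 := by
      intro p hp
      have := List.filter_eq_nil_iff.mp hrl p hp
      rw [hp56 p hp, if_neg (by simpa using this)]
    cases cs with
    | nil => exact absurd rfl hne
    | cons a t =>
      rw [pvMinlevel_eq (List.mem_cons_self) (hall a List.mem_cons_self)
        (fun p hp => le_of_eq (hall p hp).symm) (by norm_num)]
      have : pvFirstAt 6 (a :: t) = some a := by
        unfold pvFirstAt
        exact List.find?_cons_of_pos (by simp [hall a List.mem_cons_self])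
      rw [this, List.head?_cons]

-- ===== VERDICT (by name: the statement is the Claim_ definition above) =====
theorem pick_python_preview_entry_py_spec : Claim_equal_pick_python_preview_entry_py := by
  intro l _
  unfold Spec_pick_python_preview_entry_py
  have halt : pick_python_preview_entry_py_alt l = (l.foldl pvStep none).map Prod.snd := by
    unfold pick_python_preview_entry_py_alt
    cases h : l.foldl pvStep none with
    | none => simp
    | some qx => cases qx; simp
  rw [halt, foldl_step_filter]
  unfold pick_python_preview_entry_py
  cases hcs : l.filter (fun p => pvCand p) with
  | nil => rfl
  | cons a t =>
    have hc : ∀ p ∈ a :: t, pvCand p = true :=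
      fun p hp => (List.mem_filter.mp (hcs ▸ hp)).2
    rw [pvFold_none (a :: t) (by simp) hc]
    rw [← selA_spec (a :: t) (by simp) hc]
    dsimp only
    rw [if_neg (by simp)]
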